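-- pv_equiv track=rewrite | github.com/zenialeaky136/live-to-100-skills | live-to-100/scripts/generate_reminder_timetable.py | expand_interval
-- ===== SOURCE A (Python) =====
-- def expand_interval(start: int, end: int, every: int, offset: int = 0) -> list[int]:
--     if every <= 0:
--         return []
--     times: list[int] = []
--     current = start + offset
--     while current <= end:
--         if current >= start:
--             times.append(current)
--         current += every
--     return times
-- ===== SOURCE B (Python) =====
-- def expand_interval(start: int, end: int, every: int, offset: int = 0) -> list[int]:
--     if every <= 0:
--         return []
--     k = max(0, -(offset // every))
--     return list(range(start + offset + k * every, end + 1, every))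
-- ===== Notes on version B (the rewrite author's own statement) =====
-- stated objective: simpler
-- what changed: B computes the first in-range value arithmetically with ceiling division (k = max(0, -(offset // every))) and returns one range(first, end+1, every), replacing A's while-loop that walks from start+offset and filters out sub-start values.
import Mathlib
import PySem

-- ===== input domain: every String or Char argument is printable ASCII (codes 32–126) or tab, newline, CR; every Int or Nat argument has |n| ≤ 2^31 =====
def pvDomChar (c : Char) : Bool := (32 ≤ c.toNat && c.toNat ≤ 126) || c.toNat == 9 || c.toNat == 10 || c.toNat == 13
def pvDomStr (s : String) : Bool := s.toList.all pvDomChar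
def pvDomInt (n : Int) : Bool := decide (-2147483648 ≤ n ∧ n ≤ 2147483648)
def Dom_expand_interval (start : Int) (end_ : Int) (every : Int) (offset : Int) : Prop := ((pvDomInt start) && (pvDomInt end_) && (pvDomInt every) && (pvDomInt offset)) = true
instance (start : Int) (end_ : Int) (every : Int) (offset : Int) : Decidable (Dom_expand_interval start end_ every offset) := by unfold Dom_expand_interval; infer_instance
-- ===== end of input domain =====

-- B replaces A's filtered while-loop by one ceiling-division step and a single range; objective: simpler.

-- ===== PORT A =====
-- A's while-loop, step for step: walk current from start+offset by every, append when current ≥ start.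
-- (the 0 < every hypothesis only justifies termination; A's guard `every <= 0` is checked before calling it)
def expandLoopA (start : Int) (end_ : Int) (every : Int) (h : 0 < every) (current : Int) (times : List Int) : List Int :=
  if _hc : current ≤ end_ then
    expandLoopA start end_ every h (current + every)
      (if current ≥ start then times ++ [current] else times)
  else times
termination_by (end_ + 1 - current).toNat
decreasing_by omega

def expand_interval (start : Int) (end_ : Int) (every : Int) (offset : Int) : List Int :=
  if h : every ≤ 0 then []
  else expandLoopA start end_ every (by omega) (start + offset) []

-- ===== PORT B =====
def expand_interval_alt (start : Int) (end_ : Int) (every : Int) (offset : Int) : List Int :=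
  if every ≤ 0 then []
  else
    let k := max 0 (-(PySem.Int.floordiv offset every))
    PySem.List.pyRange (start + offset + k * every) (end_ + 1) every

-- ===== PRECONDITION & SPEC =====
def Spec_expand_interval (start : Int) (end_ : Int) (every : Int) (offset : Int) (out : List Int) : Prop := out = expand_interval_alt start end_ every offset
instance (start : Int) (end_ : Int) (every : Int) (offset : Int) (out : List Int) : Decidable (Spec_expand_interval start end_ every offset out) := by unfold Spec_expand_interval; infer_instance

-- ===== CLAIM (what is proved, stated in full; the proofs are below) =====
def Claim_equal_expand_interval : Prop := ∀ (start : Int) (end_ : Int) (every : Int) (offset : Int), Dom_expand_interval start end_ every offset → Spec_expand_interval start end_ every offset (expand_interval start end_ every offset)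

-- ===== LEMMAS AND PROOFS =====

theorem pyRange_pos_nil (a b s : Int) (hs : 0 < s) (hab : b ≤ a) :
    PySem.List.pyRange a b s = [] := by
  rw [PySem.List.pyRange_of_pos _ _ hs, if_neg (by omega)]
  simp

theorem pyRange_pos_cons (a b s : Int) (hs : 0 < s) (hab : a < b) :
    PySem.List.pyRange a b s = a :: PySem.List.pyRange (a + s) b s := by
  rw [PySem.List.pyRange_of_pos _ _ hs, PySem.List.pyRange_of_pos _ _ hs, if_pos hab]
  by_cases h2 : a + s < b
  · rw [if_pos h2]
    have hcount : ((b - a + s - 1) / s).toNat = ((b - (a + s) + s - 1) / s).toNat + 1 := by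
      have he : b - a + s - 1 = (b - (a + s) + s - 1) + 1 * s := by ring
      rw [he, Int.add_mul_ediv_right _ _ (ne_of_gt hs)]
      have h0 : 0 ≤ (b - (a + s) + s - 1) / s := Int.ediv_nonneg (by omega) (le_of_lt hs)
      omega
    rw [hcount, List.range_succ_eq_map]
    simp only [List.map_cons, List.map_map]
    congr 1
    · push_cast; ring
    · apply List.map_congr_left
      intro k _
      simp only [Function.comp]
      push_cast; ring
  · rw [if_neg h2]
    have h1 : (b - a + s - 1) / s = 1 := by
      have he : b - a + s - 1 = (b - a - 1) + 1 * s := by ring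
      rw [he, Int.add_mul_ediv_right _ _ (ne_of_gt hs)]
      have : (b - a - 1) / s = 0 := Int.ediv_eq_zero_of_lt (by omega) (by omega)
      omega
    rw [h1]
    simp [List.range_succ]

-- once current has reached start, the rest of A's loop is exactly a range
theorem loopA_eq_pyRange (start end_ e : Int) (h : 0 < e) :
    ∀ (n : Nat) (current : Int) (times : List Int),
      (end_ + 1 - current).toNat ≤ n → start ≤ current →
      expandLoopA start end_ e h current times = times ++ PySem.List.pyRange current (end_ + 1) e := by
  intro n
  induction n with
  | zero =>
    intro current times hn hsc
    rw [expandLoopA, dif_neg (by omega), pyRange_pos_nil _ _ _ h (by omega)]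
    simp
  | succ m ih =>
    intro current times hn hsc
    by_cases hc : current ≤ end_
    · rw [expandLoopA, dif_pos hc, if_pos hsc]
      rw [ih (current + e) (times ++ [current]) (by omega) (by omega)]
      rw [pyRange_pos_cons current (end_ + 1) e h (by omega)]
      simp
    · rw [expandLoopA, dif_neg hc, pyRange_pos_nil _ _ _ h (by omega)]
      simp

-- while current is still below start, one loop step just advances current
theorem loopA_skip_one (start end_ e : Int) (h : 0 < e) (current : Int) (times : List Int)
    (hlt : current < start) :
    expandLoopA start end_ e h current times = expandLoopA start end_ e h (current + e) times := by
  by_cases hc : current ≤ end_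
  · rw [expandLoopA, dif_pos hc, if_neg (by omega)]
  · rw [expandLoopA, dif_neg hc]
    rw [expandLoopA, dif_neg (by omega)]

theorem loopA_skip (start end_ e : Int) (h : 0 < e) (times : List Int) :
    ∀ (n : Nat) (current : Int), (∀ i : Nat, i < n → current + i * e < start) →
      expandLoopA start end_ e h current times = expandLoopA start end_ e h (current + n * e) times := by
  intro n
  induction n with
  | zero => intro current _; simp
  | succ m ih =>
    intro current hlt
    have h0 : current < start := by have := hlt 0 (by omega); simpa using this
    rw [loopA_skip_one start end_ e h current times h0]
    rw [ih (current + e) (by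
      intro i hi
      have := hlt (i + 1) (by omega)
      push_cast at this ⊢
      nlinarith)]
    congr 1
    push_cast
    ring

-- ===== VERDICT (by name: the statement is the Claim_ definition above) =====
theorem expand_interval_spec : Claim_equal_expand_interval := by
  intro start end_ every offset _
  unfold Spec_expand_interval expand_interval expand_interval_alt
  by_cases hev : every ≤ 0
  · rw [dif_pos hev, if_pos hev]
  · rw [dif_neg hev, if_neg hev]
    have he : 0 < every := by omega
    set q : Int := PySem.Int.floordiv offset every with hq
    have hqb : q * every ≤ offset ∧ offset < (q + 1) * every :=
      (PySem.Int.floordiv_eq_iff_of_pos he).mp hq.symm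
    set k : Int := max 0 (-q) with hk
    have hk0 : 0 ≤ k := le_max_left _ _
    -- skip the first k loop steps: all their values are below start
    have hskip := loopA_skip start end_ every (by omega) [] k.toNat (start + offset)
      (by
        intro i hi
        have hik : (i : Int) < k := by omega
        have hik' : (i : Int) ≤ -q - 1 := by omega
        have : (i : Int) * every ≤ (-q - 1) * every :=
          mul_le_mul_of_nonneg_right hik' (le_of_lt he)
        nlinarith [hqb.2])
    have hkcast : ((k.toNat : Int)) = k := Int.toNat_of_nonneg hk0
    rw [hkcast] at hskip
    rw [hskip]
    have hge : start ≤ start + offset + k * every := by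
      by_cases hq0 : 0 ≤ q
      · have : 0 ≤ q * every := mul_nonneg hq0 (le_of_lt he)
        nlinarith [hqb.1, mul_nonneg hk0 (le_of_lt he)]
      · have hkq : k = -q := by omega
        nlinarith [hqb.1]
    rw [loopA_eq_pyRange start end_ every (by omega) (end_ + 1 - (start + offset + k * every)).toNat
      (start + offset + k * every) [] (le_refl _) hge]
    simp [hk, hq]
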